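-- pv_equiv track=rewrite | github.com/YTommy109/aimon | app/utils/excel_parser.py | _build_sheet_text
-- ===== SOURCE A (Python) =====
-- def _build_sheet_text(cell_values: dict[tuple[int, int], str]) -> list[str]:
--     """
--     セル値からシートのテキストを構築します。
--
--     Args:
--         cell_values: セル値の辞書。
--
--     Returns:
--         シートのテキスト行のリスト。
--     """
--     sheet_text_lines: list[str] = []
--     if cell_values:
--         max_row = max(key[0] for key in cell_values)
--         max_col = max(key[1] for key in cell_values)
--         for r in range(1, max_row + 1):
--             row_text = []
--             for c in range(1, max_col + 1):
--                 row_text.append(cell_values.get((r, c), ''))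
--             sheet_text_lines.append('\t'.join(row_text))
--     return sheet_text_lines
-- ===== SOURCE B (Python) =====
-- def _build_sheet_text(cell_values: dict[tuple[int, int], str]) -> list[str]:
--     if not cell_values:
--         return []
--     max_row = max(key[0] for key in cell_values)
--     max_col = max(key[1] for key in cell_values)
--     grid = [[''] * max_col for _ in range(max_row)]
--     for (r, c), v in cell_values.items():
--         if r >= 1 and c >= 1:
--             grid[r - 1][c - 1] = v
--     return ['\t'.join(row) for row in grid]
-- ===== Notes on version B (the rewrite author's own statement) =====
-- stated objective: alternative
-- what changed: Replaces A's gather (dict.get for every cell of the max_row x max_col product) with a scatter: pre-allocate a dense grid of empty strings and make one pass over the sparse items, writing each in-range value at grid[r-1][c-1].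
import Mathlib
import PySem

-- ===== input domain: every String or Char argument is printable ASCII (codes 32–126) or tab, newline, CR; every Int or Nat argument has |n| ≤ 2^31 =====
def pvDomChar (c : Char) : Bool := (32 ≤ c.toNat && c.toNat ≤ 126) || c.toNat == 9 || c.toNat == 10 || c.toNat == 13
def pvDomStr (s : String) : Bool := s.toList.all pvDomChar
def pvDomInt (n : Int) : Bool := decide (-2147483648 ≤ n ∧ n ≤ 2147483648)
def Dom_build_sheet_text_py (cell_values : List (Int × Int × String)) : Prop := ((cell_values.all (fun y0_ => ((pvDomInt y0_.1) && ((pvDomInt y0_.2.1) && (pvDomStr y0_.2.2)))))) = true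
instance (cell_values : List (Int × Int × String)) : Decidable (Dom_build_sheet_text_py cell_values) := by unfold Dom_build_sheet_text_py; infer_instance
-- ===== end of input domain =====

-- B replaces A's per-cell dict.get gather with a pre-allocated dense grid filled by one
-- scatter pass over the sparse items (alternative decomposition, similar cost).

-- ===== PORT A =====
-- cell_values.get((r, c), '') : first-match lookup in the association list (the dict)
def pvGetCell (cv : List (Int × Int × String)) (r c : Int) : String :=
  match cv with
  | [] => ""
  | x :: t => if x.1 = r ∧ x.2.1 = c then x.2.2 else pvGetCell t r c

def build_sheet_text_py (cell_values : List (Int × Int × String)) : List String :=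
  match cell_values with
  | [] => []
  | _ :: _ =>
    let max_row := (PySem.List.max? (cell_values.map fun k => k.1) (fun y => y)).getD 0
    let max_col := (PySem.List.max? (cell_values.map fun k => k.2.1) (fun y => y)).getD 0
    (PySem.List.pyRange 1 (max_row + 1) 1).map (fun r =>
      PySem.Str.join "\t" ((PySem.List.pyRange 1 (max_col + 1) 1).map (fun c =>
        pvGetCell cell_values r c)))

-- ===== PORT B =====
-- grid[i][j] = v  (both indices known to be in range at the call sites)
def pvSetCell : List (List String) → Nat → Nat → String → List (List String)
  | [], _, _, _ => []
  | g :: gs, 0, j, v => g.set j v :: gs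
  | g :: gs, i + 1, j, v => g :: pvSetCell gs i j v

def build_sheet_text_py_alt (cell_values : List (Int × Int × String)) : List String :=
  match cell_values with
  | [] => []
  | _ :: _ =>
    let max_row := (PySem.List.max? (cell_values.map fun k => k.1) (fun y => y)).getD 0
    let max_col := (PySem.List.max? (cell_values.map fun k => k.2.1) (fun y => y)).getD 0
    let grid0 : List (List String) :=
      List.replicate max_row.toNat (List.replicate max_col.toNat "")
    let grid := cell_values.foldl (fun g x =>
      if 1 ≤ x.1 ∧ 1 ≤ x.2.1 then pvSetCell g (x.1 - 1).toNat (x.2.1 - 1).toNat x.2.2 else g) grid0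
    grid.map (fun row => PySem.Str.join "\t" row)

-- ===== PRECONDITION & SPEC =====
-- Pre_ excludes association lists with duplicate (row, col) keys: those do not represent a
-- Python dict (A's input type), and first-match vs last-write behaviour on them is accidental.
def Pre_build_sheet_text_py (cell_values : List (Int × Int × String)) : Prop :=
  (cell_values.map (fun x => (x.1, x.2.1))).Nodup
instance (cell_values : List (Int × Int × String)) : Decidable (Pre_build_sheet_text_py cell_values) := by
  unfold Pre_build_sheet_text_py; infer_instance
def pvWitness_build_sheet_text_py : (List (Int × Int × String)) := [(1, 1, "a"), (2, 3, "b")]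

def Spec_build_sheet_text_py (cell_values : List (Int × Int × String)) (out : List String) : Prop := out = build_sheet_text_py_alt cell_values
instance (cell_values : List (Int × Int × String)) (out : List String) : Decidable (Spec_build_sheet_text_py cell_values out) := by unfold Spec_build_sheet_text_py; infer_instance

-- ===== CLAIM (what is proved, stated in full; the proofs are below) =====
def Claim_equal_build_sheet_text_py : Prop := ∀ (cell_values : List (Int × Int × String)), Dom_build_sheet_text_py cell_values → Pre_build_sheet_text_py cell_values → Spec_build_sheet_text_py cell_values (build_sheet_text_py cell_values)

-- ===== LEMMAS AND PROOFS =====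

-- grid entry read, with defaults (only read in range)
def pvEntry (g : List (List String)) (i j : Nat) : String := (g.getD i []).getD j ""

-- B's scatter step
def pvStep (g : List (List String)) (x : Int × Int × String) : List (List String) :=
  if 1 ≤ x.1 ∧ 1 ≤ x.2.1 then pvSetCell g (x.1 - 1).toNat (x.2.1 - 1).toNat x.2.2 else g

-- last matching value for key (r, c)
def pvLast (cv : List (Int × Int × String)) (r c : Int) : Option String :=
  cv.foldl (fun acc x => if x.1 = r ∧ x.2.1 = c then some x.2.2 else acc) none

theorem pvSetCell_length (g : List (List String)) (a b : Nat) (v : String) :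
    (pvSetCell g a b v).length = g.length := by
  induction g generalizing a with
  | nil => rfl
  | cons r t ih => cases a with
    | zero => simp [pvSetCell]
    | succ a => simp [pvSetCell, ih]

theorem pvSetCell_rows {N : ℕ} (g : List (List String)) (a b : Nat) (v : String)
    (h : ∀ row ∈ g, row.length = N) : ∀ row ∈ pvSetCell g a b v, row.length = N := by
  induction g generalizing a with
  | nil => simp [pvSetCell]
  | cons r t ih => cases a with
    | zero =>
      intro row hrow
      rcases List.mem_cons.mp hrow with h1 | h2
      · rw [h1, List.length_set]; exact h r (by simp)
      · exact h _ (by simp [h2])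
    | succ a =>
      intro row hrow
      rcases List.mem_cons.mp hrow with h1 | h2
      · exact h _ (by simp [h1])
      · exact ih a (fun r hr => h r (by simp [hr])) row h2

theorem pvEntry_set_eq (g : List (List String)) {N : ℕ} (i j : Nat) (v : String)
    (hrow : ∀ row ∈ g, row.length = N) (hi : i < g.length) (hj : j < N) :
    pvEntry (pvSetCell g i j v) i j = v := by
  induction g generalizing i with
  | nil => simp at hi
  | cons r t ih => cases i with
    | zero =>
      have hr : r.length = N := hrow r (by simp)
      simp [pvSetCell, pvEntry, List.getD_eq_getElem?_getD, hr, hj]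
    | succ i =>
      have := ih i (fun r hr => hrow r (by simp [hr])) (by simpa using hi)
      simpa [pvSetCell, pvEntry] using this

theorem pvEntry_set_ne (g : List (List String)) (a b i j : Nat) (v : String)
    (h : ¬ (a = i ∧ b = j)) :
    pvEntry (pvSetCell g a b v) i j = pvEntry g i j := by
  induction g generalizing a i with
  | nil => rfl
  | cons r t ih =>
    cases a with
    | zero => cases i with
      | zero =>
        have hb : b ≠ j := by tauto
        simp [pvSetCell, pvEntry, List.getD_eq_getElem?_getD, List.getElem?_set_ne hb]
      | succ i => simp [pvSetCell, pvEntry]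
    | succ a => cases i with
      | zero => simp [pvSetCell, pvEntry]
      | succ i =>
        have := ih a i (by tauto)
        simpa [pvSetCell, pvEntry] using this

-- a last-match fold from any accumulator
theorem pvLast_foldl_acc (t : List (Int × Int × String)) (r c : Int) (a0 : Option String) :
    t.foldl (fun acc x => if x.1 = r ∧ x.2.1 = c then some x.2.2 else acc) a0
      = ((pvLast t r c).elim a0 some) := by
  induction t generalizing a0 with
  | nil => simp [pvLast]
  | cons x t ih =>
    simp only [pvLast, List.foldl_cons] at *
    by_cases h : x.1 = r ∧ x.2.1 = c
    · simp only [if_pos h]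
      rw [ih (some x.2.2)]
      cases t.foldl (fun acc x => if x.1 = r ∧ x.2.1 = c then some x.2.2 else acc) none <;> simp
    · simp only [if_neg h]
      exact ih a0

theorem pv_scatter_entry {N : ℕ} (cv : List (Int × Int × String)) (g : List (List String))
    (i j : Nat) (hrow : ∀ row ∈ g, row.length = N) (hi : i < g.length) (hj : j < N) :
    pvEntry (cv.foldl pvStep g) i j
      = (pvLast cv ((i : Int) + 1) ((j : Int) + 1)).getD (pvEntry g i j) := by
  induction cv generalizing g with
  | nil => simp [pvLast]
  | cons x t ih =>
    have hrow' : ∀ row ∈ pvStep g x, row.length = N := by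
      unfold pvStep; split
      · exact pvSetCell_rows g _ _ _ hrow
      · exact hrow
    have hi' : i < (pvStep g x).length := by
      unfold pvStep; split
      · rw [pvSetCell_length]; exact hi
      · exact hi
    have step1 : pvEntry ((x :: t).foldl pvStep g) i j
        = (pvLast t ((i : Int) + 1) ((j : Int) + 1)).getD (pvEntry (pvStep g x) i j) := by
      simpa using ih (pvStep g x) hrow' hi'
    rw [step1]
    have hL : pvLast (x :: t) ((i : Int) + 1) ((j : Int) + 1)
        = ((pvLast t ((i : Int) + 1) ((j : Int) + 1)).elim
            (if x.1 = (i : Int) + 1 ∧ x.2.1 = (j : Int) + 1 then some x.2.2 else none) some) := by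
      simp only [pvLast, List.foldl_cons]
      exact pvLast_foldl_acc t _ _ _
    rw [hL]
    by_cases hk : x.1 = (i : Int) + 1 ∧ x.2.1 = (j : Int) + 1
    · have hg : pvEntry (pvStep g x) i j = x.2.2 := by
        unfold pvStep
        have hpos : 1 ≤ x.1 ∧ 1 ≤ x.2.1 := by omega
        rw [if_pos hpos]
        have ha : (x.1 - 1).toNat = i := by omega
        have hb : (x.2.1 - 1).toNat = j := by omega
        rw [ha, hb]
        exact pvEntry_set_eq g i j _ hrow hi hj
      rw [hg, if_pos hk]
      cases pvLast t ((i : Int) + 1) ((j : Int) + 1) <;> simp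
    · have hg : pvEntry (pvStep g x) i j = pvEntry g i j := by
        unfold pvStep; split
        · rename_i hpos
          apply pvEntry_set_ne
          intro ⟨ha, hb⟩
          exact hk ⟨by omega, by omega⟩
        · rfl
      rw [hg, if_neg hk]
      cases pvLast t ((i : Int) + 1) ((j : Int) + 1) <;> simp

theorem pvLast_of_not_mem (t : List (Int × Int × String)) (r c : Int)
    (h : ∀ y ∈ t, ¬ (y.1 = r ∧ y.2.1 = c)) : pvLast t r c = none := by
  induction t with
  | nil => rfl
  | cons x t ih =>
    simp only [pvLast, List.foldl_cons, if_neg (h x (by simp))]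
    exact ih (fun y hy => h y (by simp [hy]))

theorem pvGetCell_eq_last (cv : List (Int × Int × String))
    (hnd : (cv.map (fun x => (x.1, x.2.1))).Nodup) (r c : Int) :
    pvGetCell cv r c = (pvLast cv r c).getD "" := by
  induction cv with
  | nil => rfl
  | cons x t ih =>
    simp only [List.map_cons, List.nodup_cons] at hnd
    by_cases h : x.1 = r ∧ x.2.1 = c
    · have hnone : ∀ y ∈ t, ¬ (y.1 = r ∧ y.2.1 = c) := by
        intro y hy hyk
        exact hnd.1 (List.mem_map.mpr ⟨y, hy, by simp [h.1, h.2, hyk.1, hyk.2]⟩)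
      have : pvLast (x :: t) r c = some x.2.2 := by
        simp only [pvLast, List.foldl_cons, if_pos h]
        rw [pvLast_foldl_acc t r c (some x.2.2), pvLast_of_not_mem t r c hnone]
        rfl
      simp [pvGetCell, if_pos h, this]
    · have : pvLast (x :: t) r c = pvLast t r c := by
        simp only [pvLast, List.foldl_cons, if_neg h]
      simp [pvGetCell, if_neg h, this, ih hnd.2]

-- ===== VERDICT (by name: the statement is the Claim_ definition above) =====
theorem build_sheet_text_py_spec : Claim_equal_build_sheet_text_py := by
  intro cv _ hpre
  unfold Spec_build_sheet_text_py build_sheet_text_py build_sheet_text_py_alt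
  cases cv with
  | nil => rfl
  | cons x0 t0 =>
    dsimp only
    set cv := x0 :: t0 with hcv
    set mr := (PySem.List.max? (cv.map fun k => k.1) (fun y => y)).getD 0 with hmr
    set mc := (PySem.List.max? (cv.map fun k => k.2.1) (fun y => y)).getD 0 with hmc
    set M := mr.toNat
    set N := mc.toNat
    set grid0 : List (List String) := List.replicate M (List.replicate N "")
    set grid := cv.foldl (fun g x =>
      if 1 ≤ x.1 ∧ 1 ≤ x.2.1 then pvSetCell g (x.1 - 1).toNat (x.2.1 - 1).toNat x.2.2 else g) grid0 with hgrid
    have hrow0 : ∀ row ∈ grid0, row.length = N := by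
      intro row hr; simp [grid0] at hr; simp [hr.2]
    have hlen0 : grid0.length = M := by simp [grid0]
    have hstep : (fun (g : List (List String)) (x : Int × Int × String) =>
        if 1 ≤ x.1 ∧ 1 ≤ x.2.1 then pvSetCell g (x.1 - 1).toNat (x.2.1 - 1).toNat x.2.2 else g) = pvStep := by
      funext g x; simp [pvStep]
    have hglen : grid.length = M := by
      rw [hgrid, hstep]
      clear_value grid0
      clear hgrid hrow0
      induction cv generalizing grid0 with
      | nil => exact hlen0
      | cons y t ih =>
        rw [List.foldl_cons]
        apply ih
        unfold pvStep; split
        · rw [pvSetCell_length]; exact hlen0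
        · exact hlen0
    have hgrows : ∀ row ∈ grid, row.length = N := by
      rw [hgrid, hstep]
      clear_value grid0
      clear hgrid hlen0 hglen
      induction cv generalizing grid0 with
      | nil => exact hrow0
      | cons y t ih =>
        rw [List.foldl_cons]
        apply ih
        unfold pvStep; split
        · exact pvSetCell_rows _ _ _ _ hrow0
        · exact hrow0
    have hentry : ∀ i j : Nat, i < M → j < N →
        pvEntry grid i j = pvGetCell cv ((i : Int) + 1) ((j : Int) + 1) := by
      intro i j hiM hjN
      rw [hgrid, hstep, pv_scatter_entry cv grid0 i j hrow0 (by omega) hjN]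
      have h0 : pvEntry grid0 i j = "" := by
        simp [pvEntry, grid0, List.getD_eq_getElem?_getD, hiM, hjN]
      rw [h0, pvGetCell_eq_last cv hpre]
    -- both sides as maps over ranges
    rw [PySem.List.pyRange_one 1 (mr + 1), PySem.List.pyRange_one 1 (mc + 1)]
    have hM : (mr + 1 - 1).toNat = M := by simp [M]
    have hN : (mc + 1 - 1).toNat = N := by simp [N]
    rw [hM, hN]
    apply List.ext_getElem
    · simp [hglen]
    · intro i h1 h2
      have hiM : i < M := by simpa [hglen] using h2
      simp only [List.getElem_map, List.getElem_range]
      congr 1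
      apply List.ext_getElem
      · have := hgrows grid[i] (List.getElem_mem _)
        simp [this]
      · intro j h3 h4
        have hjN : j < N := by
          have := hgrows grid[i] (List.getElem_mem _)
          omega
        simp only [List.getElem_map, List.getElem_range]
        rw [add_comm (1 : ℤ) (i : ℤ), add_comm (1 : ℤ) (j : ℤ), ← hentry i j hiM hjN]
        simp [pvEntry, List.getD_eq_getElem?_getD,
          List.getElem?_eq_getElem (by omega : i < grid.length),
          List.getElem?_eq_getElem (by omega : j < grid[i].length)]
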